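-- pv_equiv track=rewrite | github.com/bravojuandb/python-daily-drills | old/level1_fluency/find_max_min/drill_1.py | find_second_min_max
-- ===== SOURCE A (Python) =====
-- def find_second_min_max(nums: list[int]) -> tuple[int, int]:
--     if not nums:
--         raise ValueError("Empty list")
--
--     unique = set(nums)
--     if len(unique) < 2:
--         raise ValueError("Not enough unique values")
--
--     # One pass to find min and max
--     iterator = iter(unique)
--     first = next(iterator)
--     min_val = max_val = first
--
--     for num in unique:
--         if num < min_val:
--             min_val = num
--         if num > max_val:
--             max_val = num
--
--     # One pass to find second min and second max
--     second_min = second_max = None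
--
--     for num in unique:
--         if num != min_val:
--             if second_min is None or num < second_min:
--                 second_min = num
--         if num != max_val:
--             if second_max is None or num > second_max:
--                 second_max = num
--
--     if second_min is None or second_max is None:
--         raise ValueError("Not enough unique values")
--
--     return (second_min, second_max)
-- ===== SOURCE B (Python) =====
-- def find_second_min_max(nums: list[int]) -> tuple[int, int]:
--     if not nums:
--         raise ValueError("Empty list")
--     s = sorted(set(nums))
--     if len(s) < 2:
--         raise ValueError("Not enough unique values")
--     return (s[1], s[-2])
-- ===== Notes on version B (the rewrite author's own statement) =====
-- stated objective: simpler
-- what changed: Replaces A's two manual scan passes with None-based accumulators by a single sort of the unique values and positional indexing: return (s[1], s[-2]) of s = sorted(set(nums)).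
import Mathlib
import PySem

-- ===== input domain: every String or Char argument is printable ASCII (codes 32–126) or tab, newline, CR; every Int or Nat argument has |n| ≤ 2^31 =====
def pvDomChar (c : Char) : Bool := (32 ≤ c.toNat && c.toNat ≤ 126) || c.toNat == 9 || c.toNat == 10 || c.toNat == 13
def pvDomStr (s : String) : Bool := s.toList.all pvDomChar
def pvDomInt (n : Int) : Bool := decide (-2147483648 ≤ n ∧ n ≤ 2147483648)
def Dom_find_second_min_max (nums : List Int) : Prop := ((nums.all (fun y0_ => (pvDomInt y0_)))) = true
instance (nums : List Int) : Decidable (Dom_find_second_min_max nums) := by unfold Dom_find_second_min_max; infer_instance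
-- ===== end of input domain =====

-- B replaces A's two manual scan passes (min/max pass, then None-accumulator second-min/second-max pass)
-- by sorting the unique values once and indexing: (s[1], s[-2]) of s = sorted(set(nums)). Objective: simpler.
-- A's set-iteration order does not affect its result, so the ports iterate the set in first-occurrence order.

-- ===== PORT A =====
-- body of A's first for-loop (min/max accumulation over the pair (min_val, max_val))
def pvMinMaxStep (p : Int × Int) (num : Int) : Int × Int :=
  (if num < p.1 then num else p.1, if num > p.2 then num else p.2)

-- body of A's second for-loop, first component (second_min)
def pvSecondMinStep (mn : Int) (o : Option Int) (num : Int) : Option Int :=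
  if num ≠ mn then
    match o with
    | none => some num
    | some v => if num < v then some num else some v
  else o

-- body of A's second for-loop, second component (second_max)
def pvSecondMaxStep (mx : Int) (o : Option Int) (num : Int) : Option Int :=
  if num ≠ mx then
    match o with
    | none => some num
    | some v => if num > v then some num else some v
  else o

def pvSecondStep (mn mx : Int) (p : Option Int × Option Int) (num : Int) : Option Int × Option Int :=
  (pvSecondMinStep mn p.1 num, pvSecondMaxStep mx p.2 num)

def find_second_min_max (nums : List Int) : Int × Int :=
  if nums = [] then (0, 0)          -- Python: raise ValueError("Empty list")  (outside Pre_)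
  else
    let unique : PySem.Set Int := PySem.Set.ofList nums
    if unique.length < 2 then (0, 0) -- Python: raise ValueError("Not enough unique values")  (outside Pre_)
    else
      match unique with
      | [] => (0, 0)                 -- unreachable (unique is nonempty here)
      | first :: _ =>
        let mm := unique.foldl pvMinMaxStep (first, first)
        let ss := unique.foldl (pvSecondStep mm.1 mm.2) (none, none)
        match ss.1, ss.2 with
        | some a, some b => (a, b)
        | _, _ => (0, 0)             -- Python: raise ValueError("Not enough unique values")  (outside Pre_)

-- ===== PORT B =====
def find_second_min_max_alt (nums : List Int) : Int × Int :=
  if nums = [] then (0, 0)          -- raise ValueError("Empty list")  (outside Pre_)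
  else
    let s := PySem.List.sorted (PySem.Set.ofList nums) (fun x => x)
    if s.length < 2 then (0, 0)     -- raise ValueError("Not enough unique values")  (outside Pre_)
    else ((PySem.List.pyGet? s 1).getD 0, (PySem.List.pyGet? s (-2)).getD 0)

-- ===== PRECONDITION & SPEC =====
-- Pre_ excludes exactly the inputs on which A raises ValueError: the empty list and lists
-- with fewer than two distinct values.
def Pre_find_second_min_max (nums : List Int) : Prop :=
  ∃ a ∈ nums, ∃ b ∈ nums, a ≠ b

instance (nums : List Int) : Decidable (Pre_find_second_min_max nums) := by
  unfold Pre_find_second_min_max; infer_instance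

def pvWitness_find_second_min_max : List Int := [3, 1, 4, 1, 5]

def Spec_find_second_min_max (nums : List Int) (out : Int × Int) : Prop := out = find_second_min_max_alt nums
instance (nums : List Int) (out : Int × Int) : Decidable (Spec_find_second_min_max nums out) := by unfold Spec_find_second_min_max; infer_instance

-- ===== CLAIM (what is proved, stated in full; the proofs are below) =====
def Claim_equal_find_second_min_max : Prop := ∀ (nums : List Int), Dom_find_second_min_max nums → Pre_find_second_min_max nums → Spec_find_second_min_max nums (find_second_min_max nums)

-- ===== LEMMAS AND PROOFS =====

-- two distinct members force length ≥ 2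
theorem pv_two_mem_le_length {α : Type} {l : List α} {a b : α}
    (ha : a ∈ l) (hb : b ∈ l) (hab : a ≠ b) : 2 ≤ l.length := by
  match l with
  | [] => simp at ha
  | [x] =>
    simp at ha hb
    exact absurd (ha.trans hb.symm) hab
  | _ :: _ :: _ => simp

-- spec of A's first loop: the accumulated pair is (a member ≤ everything, a member ≥ everything)
theorem pv_mm_spec : ∀ (l : List Int) (p : Int × Int),
    ((l.foldl pvMinMaxStep p).1 = p.1 ∨ (l.foldl pvMinMaxStep p).1 ∈ l)
  ∧ ((l.foldl pvMinMaxStep p).2 = p.2 ∨ (l.foldl pvMinMaxStep p).2 ∈ l)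
  ∧ (l.foldl pvMinMaxStep p).1 ≤ p.1 ∧ p.2 ≤ (l.foldl pvMinMaxStep p).2
  ∧ (∀ y ∈ l, (l.foldl pvMinMaxStep p).1 ≤ y ∧ y ≤ (l.foldl pvMinMaxStep p).2) := by
  intro l
  induction l with
  | nil => simp
  | cons x t ih =>
    intro p
    obtain ⟨h1, h2, h3, h4, h5⟩ := ih (pvMinMaxStep p x)
    simp only [List.foldl_cons]
    have hq1 : (pvMinMaxStep p x).1 = p.1 ∨ (pvMinMaxStep p x).1 = x := by
      by_cases h : x < p.1 <;> simp [pvMinMaxStep, h]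
    have hq2 : (pvMinMaxStep p x).2 = p.2 ∨ (pvMinMaxStep p x).2 = x := by
      by_cases h : x > p.2 <;> simp [pvMinMaxStep, h]
    have hle1 : (pvMinMaxStep p x).1 ≤ p.1 ∧ (pvMinMaxStep p x).1 ≤ x := by
      by_cases h : x < p.1 <;> simp [pvMinMaxStep, h] <;> omega
    have hle2 : p.2 ≤ (pvMinMaxStep p x).2 ∧ x ≤ (pvMinMaxStep p x).2 := by
      by_cases h : x > p.2 <;> simp [pvMinMaxStep, h] <;> omega
    refine ⟨?_, ?_, by omega, by omega, ?_⟩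
    · rcases h1 with h | h
      · rcases hq1 with hq | hq
        · exact Or.inl (h.trans hq)
        · exact Or.inr (by simp [h, hq])
      · exact Or.inr (List.mem_cons_of_mem _ h)
    · rcases h2 with h | h
      · rcases hq2 with hq | hq
        · exact Or.inl (h.trans hq)
        · exact Or.inr (by simp [h, hq])
      · exact Or.inr (List.mem_cons_of_mem _ h)
    · intro y hy
      rcases List.mem_cons.mp hy with rfl | hy
      · exact ⟨by omega, by omega⟩
      · exact h5 y hy

-- the paired second loop is the pair of the component loops
theorem pv_ss_components (mn mx : Int) : ∀ (l : List Int) (o1 o2 : Option Int),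
    l.foldl (pvSecondStep mn mx) (o1, o2)
      = (l.foldl (pvSecondMinStep mn) o1, l.foldl (pvSecondMaxStep mx) o2) := by
  intro l
  induction l with
  | nil => intro o1 o2; rfl
  | cons x t ih => intro o1 o2; simpa [pvSecondStep] using ih (pvSecondMinStep mn o1 x) (pvSecondMaxStep mx o2 x)

-- step helpers for the second_min accumulator
theorem pv_smin_step_some (mn : Int) (o : Option Int) (x w : Int) (h : o = some w) :
    ∃ u, pvSecondMinStep mn o x = some u ∧ u ≤ w := by
  subst h
  by_cases hx : x = mn
  · exact ⟨w, by simp [pvSecondMinStep, hx], le_refl w⟩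
  · by_cases hlt : x < w
    · exact ⟨x, by simp [pvSecondMinStep, hx, hlt], by omega⟩
    · exact ⟨w, by simp [pvSecondMinStep, hx, hlt], le_refl w⟩

theorem pv_smin_step_some_x (mn : Int) (o : Option Int) (x : Int) (hx : x ≠ mn) :
    ∃ u, pvSecondMinStep mn o x = some u ∧ u ≤ x := by
  cases o with
  | none => exact ⟨x, by simp [pvSecondMinStep, hx], le_refl x⟩
  | some w =>
    by_cases hlt : x < w
    · exact ⟨x, by simp [pvSecondMinStep, hx, hlt], le_refl x⟩
    · exact ⟨w, by simp [pvSecondMinStep, hx, hlt], by omega⟩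

theorem pv_smin_step_cases (mn : Int) (o : Option Int) (x v : Int)
    (h : pvSecondMinStep mn o x = some v) : o = some v ∨ (v = x ∧ x ≠ mn) := by
  by_cases hx : x = mn
  · left; simpa [pvSecondMinStep, hx] using h
  · cases o with
    | none => right; simp [pvSecondMinStep, hx] at h; exact ⟨h.symm, hx⟩
    | some w =>
      by_cases hlt : x < w
      · right; simp [pvSecondMinStep, hx, hlt] at h; exact ⟨h.symm, hx⟩
      · left; simp [pvSecondMinStep, hx, hlt] at h; simp [h]

theorem pv_smin_never_none (mn : Int) : ∀ (l : List Int) (v : Int),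
    l.foldl (pvSecondMinStep mn) (some v) ≠ none := by
  intro l
  induction l with
  | nil => intro v; simp
  | cons x t ih =>
    intro v
    simp only [List.foldl_cons]
    by_cases hx : x = mn
    · simpa [pvSecondMinStep, hx] using ih v
    · by_cases hlt : x < v
      · simpa [pvSecondMinStep, hx, hlt] using ih x
      · simpa [pvSecondMinStep, hx, hlt] using ih v

-- spec of the second_min accumulator
theorem pv_smin_spec (mn : Int) : ∀ (l : List Int) (o : Option Int),
    (∀ v, l.foldl (pvSecondMinStep mn) o = some v →
      (o = some v ∨ (v ∈ l ∧ v ≠ mn)) ∧ (∀ w, o = some w → v ≤ w) ∧ (∀ y ∈ l, y ≠ mn → v ≤ y))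
  ∧ (∀ y ∈ l, y ≠ mn → l.foldl (pvSecondMinStep mn) o ≠ none) := by
  intro l
  induction l with
  | nil =>
    intro o
    refine ⟨fun v hv => ⟨Or.inl hv, fun w hw => by simp at hv; rw [hv] at hw; injection hw with h; omega, by simp⟩, by simp⟩
  | cons x t ih =>
    intro o
    obtain ⟨ih1, ih2⟩ := ih (pvSecondMinStep mn o x)
    constructor
    · intro v hv
      simp only [List.foldl_cons] at hv
      obtain ⟨c1, c2, c3⟩ := ih1 v hv
      refine ⟨?_, ?_, ?_⟩
      · rcases c1 with h | h
        · rcases pv_smin_step_cases mn o x v h with h' | h'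
          · exact Or.inl h'
          · exact Or.inr ⟨by simp [h'.1], h'.1 ▸ h'.2⟩
        · exact Or.inr ⟨List.mem_cons_of_mem _ h.1, h.2⟩
      · intro w hw
        obtain ⟨u, hu, huw⟩ := pv_smin_step_some mn o x w hw
        exact (c2 u hu).trans huw
      · intro y hy hymn
        rcases List.mem_cons.mp hy with rfl | hy'
        · obtain ⟨u, hu, hux⟩ := pv_smin_step_some_x mn o y hymn
          exact (c2 u hu).trans hux
        · exact c3 y hy' hymn
    · intro y hy hymn
      simp only [List.foldl_cons]
      rcases List.mem_cons.mp hy with rfl | hy'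
      · obtain ⟨u, hu, _⟩ := pv_smin_step_some_x mn o y hymn
        rw [hu]; exact pv_smin_never_none mn t u
      · exact ih2 y hy' hymn

-- step helpers for the second_max accumulator
theorem pv_smax_step_some (mx : Int) (o : Option Int) (x w : Int) (h : o = some w) :
    ∃ u, pvSecondMaxStep mx o x = some u ∧ w ≤ u := by
  subst h
  by_cases hx : x = mx
  · exact ⟨w, by simp [pvSecondMaxStep, hx], le_refl w⟩
  · by_cases hlt : x > w
    · exact ⟨x, by simp [pvSecondMaxStep, hx, hlt], by omega⟩
    · exact ⟨w, by simp [pvSecondMaxStep, hx, hlt], le_refl w⟩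

theorem pv_smax_step_some_x (mx : Int) (o : Option Int) (x : Int) (hx : x ≠ mx) :
    ∃ u, pvSecondMaxStep mx o x = some u ∧ x ≤ u := by
  cases o with
  | none => exact ⟨x, by simp [pvSecondMaxStep, hx], le_refl x⟩
  | some w =>
    by_cases hlt : x > w
    · exact ⟨x, by simp [pvSecondMaxStep, hx, hlt], le_refl x⟩
    · exact ⟨w, by simp [pvSecondMaxStep, hx, hlt], by omega⟩

theorem pv_smax_step_cases (mx : Int) (o : Option Int) (x v : Int)
    (h : pvSecondMaxStep mx o x = some v) : o = some v ∨ (v = x ∧ x ≠ mx) := by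
  by_cases hx : x = mx
  · left; simpa [pvSecondMaxStep, hx] using h
  · cases o with
    | none => right; simp [pvSecondMaxStep, hx] at h; exact ⟨h.symm, hx⟩
    | some w =>
      by_cases hlt : x > w
      · right; simp [pvSecondMaxStep, hx, hlt] at h; exact ⟨h.symm, hx⟩
      · left; simp [pvSecondMaxStep, hx, hlt] at h; simp [h]

theorem pv_smax_never_none (mx : Int) : ∀ (l : List Int) (v : Int),
    l.foldl (pvSecondMaxStep mx) (some v) ≠ none := by
  intro l
  induction l with
  | nil => intro v; simp
  | cons x t ih =>
    intro v
    simp only [List.foldl_cons]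
    by_cases hx : x = mx
    · simpa [pvSecondMaxStep, hx] using ih v
    · by_cases hlt : x > v
      · simpa [pvSecondMaxStep, hx, hlt] using ih x
      · simpa [pvSecondMaxStep, hx, hlt] using ih v

-- spec of the second_max accumulator
theorem pv_smax_spec (mx : Int) : ∀ (l : List Int) (o : Option Int),
    (∀ v, l.foldl (pvSecondMaxStep mx) o = some v →
      (o = some v ∨ (v ∈ l ∧ v ≠ mx)) ∧ (∀ w, o = some w → w ≤ v) ∧ (∀ y ∈ l, y ≠ mx → y ≤ v))
  ∧ (∀ y ∈ l, y ≠ mx → l.foldl (pvSecondMaxStep mx) o ≠ none) := by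
  intro l
  induction l with
  | nil =>
    intro o
    refine ⟨fun v hv => ⟨Or.inl hv, fun w hw => by simp at hv; rw [hv] at hw; injection hw with h; omega, by simp⟩, by simp⟩
  | cons x t ih =>
    intro o
    obtain ⟨ih1, ih2⟩ := ih (pvSecondMaxStep mx o x)
    constructor
    · intro v hv
      simp only [List.foldl_cons] at hv
      obtain ⟨c1, c2, c3⟩ := ih1 v hv
      refine ⟨?_, ?_, ?_⟩
      · rcases c1 with h | h
        · rcases pv_smax_step_cases mx o x v h with h' | h'
          · exact Or.inl h'
          · exact Or.inr ⟨by simp [h'.1], h'.1 ▸ h'.2⟩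
        · exact Or.inr ⟨List.mem_cons_of_mem _ h.1, h.2⟩
      · intro w hw
        obtain ⟨u, hu, huw⟩ := pv_smax_step_some mx o x w hw
        exact huw.trans (c2 u hu)
      · intro y hy hymx
        rcases List.mem_cons.mp hy with rfl | hy'
        · obtain ⟨u, hu, hux⟩ := pv_smax_step_some_x mx o y hymx
          exact hux.trans (c2 u hu)
        · exact c3 y hy' hymx
    · intro y hy hymx
      simp only [List.foldl_cons]
      rcases List.mem_cons.mp hy with rfl | hy'
      · obtain ⟨u, hu, _⟩ := pv_smax_step_some_x mx o y hymx
        rw [hu]; exact pv_smax_never_none mx t u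
      · exact ih2 y hy' hymx

-- ===== VERDICT (by name: the statement is the Claim_ definition above) =====
theorem find_second_min_max_spec : Claim_equal_find_second_min_max := by
  intro nums _ hpre
  unfold Spec_find_second_min_max
  obtain ⟨a, ha, b, hb, hab⟩ := hpre
  have hne : nums ≠ [] := by intro h; subst h; simp at ha
  have hau : a ∈ PySem.Set.ofList nums := (PySem.Set.mem_ofList nums a).mpr ha
  have hbu : b ∈ PySem.Set.ofList nums := (PySem.Set.mem_ofList nums b).mpr hb
  have hu2 : 2 ≤ (PySem.Set.ofList nums).length := pv_two_mem_le_length hau hbu hab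
  set s := PySem.List.sorted (PySem.Set.ofList nums) (fun x => x) with hs
  have hsperm : s.Perm (PySem.Set.ofList nums) := PySem.List.sorted_perm _ _ _
  have hslen : s.length = (PySem.Set.ofList nums).length := hsperm.length_eq
  have hspair : s.Pairwise (· < ·) := PySem.List.sorted_ofList_pairwise_lt nums
  have hs2 : 2 ≤ s.length := by omega
  have hlt : ∀ (i j : ℕ) (hi : i < s.length) (hj : j < s.length), i < j → s[i] < s[j] :=
    List.pairwise_iff_getElem.mp hspair
  have hmono : ∀ (i j : ℕ) (hi : i < s.length) (hj : j < s.length), i ≤ j → s[i] ≤ s[j] := by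
    intro i j hi hj hij
    rcases eq_or_lt_of_le hij with rfl | h
    · exact le_refl _
    · exact le_of_lt (hlt i j hi hj h)
  obtain ⟨first, rest, hu⟩ : ∃ f r, PySem.Set.ofList nums = f :: r := by
    cases h : PySem.Set.ofList nums with
    | nil => rw [h] at hu2; simp at hu2
    | cons f r => exact ⟨f, r, rfl⟩
  have hmem : ∀ x : Int, x ∈ s ↔ x ∈ first :: rest := by
    intro x; rw [hsperm.mem_iff, hu]
  -- min/max pass
  obtain ⟨m1, m2, _, _, m5⟩ := pv_mm_spec (first :: rest) (first, first)
  set P := (first :: rest).foldl pvMinMaxStep (first, first) with hP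
  have hmn_mem : P.1 ∈ first :: rest := by
    rcases m1 with h | h
    · rw [h]; exact List.mem_cons_self
    · exact h
  have hmx_mem : P.2 ∈ first :: rest := by
    rcases m2 with h | h
    · rw [h]; exact List.mem_cons_self
    · exact h
  have hmn : P.1 = s[0]'(by omega) := by
    apply le_antisymm
    · exact (m5 _ ((hmem _).mp (List.getElem_mem _))).1
    · obtain ⟨i, hi, hie⟩ := List.mem_iff_getElem.mp ((hmem _).mpr hmn_mem)
      rw [← hie]; exact hmono 0 i (by omega) hi (by omega)
  have hmx : P.2 = s[s.length - 1]'(by omega) := by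
    apply le_antisymm
    · obtain ⟨i, hi, hie⟩ := List.mem_iff_getElem.mp ((hmem _).mpr hmx_mem)
      rw [← hie]; exact hmono i (s.length - 1) hi (by omega) (by omega)
    · exact (m5 _ ((hmem _).mp (List.getElem_mem _))).2
  -- second pass, first component
  have hne01 : s[0]'(by omega) < s[1]'(by omega) := hlt 0 1 (by omega) (by omega) (by omega)
  have hs1mem : s[1]'(by omega) ∈ first :: rest := (hmem _).mp (List.getElem_mem _)
  obtain ⟨smin1, smin2⟩ := pv_smin_spec P.1 (first :: rest) none
  have hr1ne : (first :: rest).foldl (pvSecondMinStep P.1) none ≠ none :=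
    smin2 _ hs1mem (by rw [hmn]; omega)
  obtain ⟨v1, hr1⟩ := Option.ne_none_iff_exists'.mp hr1ne
  obtain ⟨c1, _, c3⟩ := smin1 v1 hr1
  have hv1mem : v1 ∈ first :: rest ∧ v1 ≠ P.1 := by
    rcases c1 with h | h
    · exact absurd h (by simp)
    · exact h
  have hv1 : v1 = s[1]'(by omega) := by
    apply le_antisymm
    · exact c3 _ hs1mem (by rw [hmn]; omega)
    · obtain ⟨i, hi, hie⟩ := List.mem_iff_getElem.mp ((hmem _).mpr hv1mem.1)
      have hi0 : i ≠ 0 := by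
        intro h; subst h; exact hv1mem.2 (hie ▸ hmn.symm)
      rw [← hie]; exact hmono 1 i (by omega) hi (by omega)
  -- second pass, second component
  have hnelast : s[s.length - 2]'(by omega) < s[s.length - 1]'(by omega) :=
    hlt _ _ (by omega) (by omega) (by omega)
  have hs2mem : s[s.length - 2]'(by omega) ∈ first :: rest := (hmem _).mp (List.getElem_mem _)
  obtain ⟨smax1, smax2⟩ := pv_smax_spec P.2 (first :: rest) none
  have hr2ne : (first :: rest).foldl (pvSecondMaxStep P.2) none ≠ none :=
    smax2 _ hs2mem (by rw [hmx]; omega)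
  obtain ⟨v2, hr2⟩ := Option.ne_none_iff_exists'.mp hr2ne
  obtain ⟨d1, _, d3⟩ := smax1 v2 hr2
  have hv2mem : v2 ∈ first :: rest ∧ v2 ≠ P.2 := by
    rcases d1 with h | h
    · exact absurd h (by simp)
    · exact h
  have hv2 : v2 = s[s.length - 2]'(by omega) := by
    apply le_antisymm
    · obtain ⟨i, hi, hie⟩ := List.mem_iff_getElem.mp ((hmem _).mpr hv2mem.1)
      have hilast : i ≠ s.length - 1 := by
        intro h; subst h; exact hv2mem.2 (hie ▸ hmx.symm)
      rw [← hie]; exact hmono i (s.length - 2) hi (by omega) (by omega)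
    · exact d3 _ hs2mem (by rw [hmx]; omega)
  -- assemble both sides
  have hB : find_second_min_max_alt nums = (s[1]'(by omega), s[s.length - 2]'(by omega)) := by
    unfold find_second_min_max_alt
    rw [if_neg hne, ← hs, if_neg (by omega : ¬ s.length < 2)]
    have hg1 : PySem.List.pyGet? s 1 = some (s[1]'(by omega)) := by
      rw [PySem.List.pyGet?_of_nonneg s (by norm_num)]
      simp
    have hg2 : PySem.List.pyGet? s (-2) = some (s[s.length - 2]'(by omega)) := by
      rw [PySem.List.pyGet?_neg_ofNat s 2 (by omega) (by omega)]
      simp [List.getElem?_eq_getElem (by omega : s.length - 2 < s.length)]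
    rw [hg1, hg2]; rfl
  have hA : find_second_min_max nums = (v1, v2) := by
    unfold find_second_min_max
    rw [if_neg hne]
    simp only [hu]
    rw [if_neg (by rw [← hu]; omega : ¬ (first :: rest).length < 2)]
    simp only [pv_ss_components, ← hP, hr1, hr2]
  rw [hA, hB, hv1, hv2]
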